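-- pv_equiv track=rewrite | github.com/Yanbing-Chen/Faster-R-CNN | vision_for_anchor.py | get_resnet50_output_length
-- ===== SOURCE A (Python) =====
-- def get_resnet50_output_length(height, width):
--     def get_output_length(input_length):
--         filter_sizes    = [7, 3, 1, 1]
--         padding         = [3, 1, 0, 0]
--         stride          = 2
--         for i in range(4):
--             input_length = (input_length + 2 * padding[i] - filter_sizes[i]) // stride + 1
--         return input_length
--     return get_output_length(height), get_output_length(width)
-- ===== SOURCE B (Python) =====
-- def get_resnet50_output_length(height, width):
--     # Each of the four ResNet50 downsampling layers reduces an integer length x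
--     # to (x-1)//2 + 1; iterating this four times equals the closed form (x-1)//16 + 1.
--     return (height - 1) // 16 + 1, (width - 1) // 16 + 1
-- ===== Notes on version B (the rewrite author's own statement) =====
-- stated objective: simpler
-- what changed: Replaces the 4-iteration loop over filter/padding tables with a direct closed-form expression (x-1)//16+1 per dimension.
import Mathlib
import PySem

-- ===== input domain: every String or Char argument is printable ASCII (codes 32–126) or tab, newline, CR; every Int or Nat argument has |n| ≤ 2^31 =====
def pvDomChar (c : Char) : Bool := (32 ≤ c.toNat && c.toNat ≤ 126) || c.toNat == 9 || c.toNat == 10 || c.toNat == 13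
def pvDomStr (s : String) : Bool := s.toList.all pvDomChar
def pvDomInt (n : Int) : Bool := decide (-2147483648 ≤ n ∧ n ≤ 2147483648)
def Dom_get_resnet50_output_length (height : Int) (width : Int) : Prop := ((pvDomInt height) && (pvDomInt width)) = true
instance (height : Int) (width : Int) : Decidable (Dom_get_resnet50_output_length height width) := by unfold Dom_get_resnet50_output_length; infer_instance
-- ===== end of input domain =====

-- B replaces A's 4-iteration loop over filter/padding tables by the closed form (x-1)//16+1 per dimension (objective: simpler).

-- ===== PORT A =====
-- A-side helper: the nested get_output_length with its table-driven 4-step loop.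
def pvGetOutputLengthA (input_length : Int) : Int :=
  let filter_sizes : List Int := [7, 3, 1, 1]
  let padding : List Int := [3, 1, 0, 0]
  let stride : Int := 2
  (PySem.List.pyRange 0 4 1).foldl
    (fun acc i =>
      PySem.Int.floordiv (acc + 2 * (PySem.List.pyGetD padding i 0) - PySem.List.pyGetD filter_sizes i 0) stride + 1)
    input_length

def get_resnet50_output_length (height : Int) (width : Int) : Int × Int :=
  (pvGetOutputLengthA height, pvGetOutputLengthA width)

-- ===== PORT B =====
def get_resnet50_output_length_alt (height : Int) (width : Int) : Int × Int :=
  (PySem.Int.floordiv (height - 1) 16 + 1, PySem.Int.floordiv (width - 1) 16 + 1)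

-- ===== PRECONDITION & SPEC =====
def Spec_get_resnet50_output_length (height : Int) (width : Int) (out : Int × Int) : Prop := out = get_resnet50_output_length_alt height width
instance (height : Int) (width : Int) (out : Int × Int) : Decidable (Spec_get_resnet50_output_length height width out) := by unfold Spec_get_resnet50_output_length; infer_instance

-- ===== CLAIM (what is proved, stated in full; the proofs are below) =====
def Claim_equal_get_resnet50_output_length : Prop := ∀ (height : Int) (width : Int), Dom_get_resnet50_output_length height width → Spec_get_resnet50_output_length height width (get_resnet50_output_length height width)

-- ===== LEMMAS AND PROOFS =====
theorem pvHelper_closed (x : Int) : pvGetOutputLengthA x = PySem.Int.floordiv (x - 1) 16 + 1 := by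
  show ((((PySem.Int.floordiv (x + 2 * 3 - 7) 2 + 1) |> fun y => PySem.Int.floordiv (y + 2 * 1 - 3) 2 + 1)
        |> fun y => PySem.Int.floordiv (y + 2 * 0 - 1) 2 + 1)
        |> fun y => PySem.Int.floordiv (y + 2 * 0 - 1) 2 + 1)
      = PySem.Int.floordiv (x - 1) 16 + 1
  simp only [PySem.Int.floordiv_eq_ediv_of_pos (by omega : (0:Int) < 2),
             PySem.Int.floordiv_eq_ediv_of_pos (by omega : (0:Int) < 16)]
  omega

-- ===== VERDICT (by name: the statement is the Claim_ definition above) =====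
theorem get_resnet50_output_length_spec : Claim_equal_get_resnet50_output_length := by
  intro height width _
  unfold Spec_get_resnet50_output_length get_resnet50_output_length get_resnet50_output_length_alt
  rw [pvHelper_closed, pvHelper_closed]
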